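-- pv_equiv track=rewrite | github.com/TungVip/Python_Basic | exercises/exc5.py | create_string_list
-- ===== SOURCE A (Python) =====
-- def create_string_list(string):
--     lst = []
--     ini_num = 0
--     while True:
--         length = len(string)
--         ini_string = ""
--
--         while len(ini_string) < len(string):
--             remaining = ini_num % length
--             ini_string += string[remaining]
--             ini_num += 1
--
--         lst.append(ini_string)
--         ini_num += 1
--         if lst.count(string) == 2:
--             break
--     lst.pop(-1)
--     return lst
-- ===== SOURCE B (Python) =====
-- def create_string_list(string):
--     # Closed-form: the rotation period is the first offset >= 1 where the
--     # doubled string realigns with the original; emit that many rotations.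
--     p = (string + string).find(string, 1)
--     return [string[i:] + string[:i] for i in range(max(p, 1))]
-- ===== Notes on version B (the rewrite author's own statement) =====
-- stated objective: faster
-- what changed: Replaces A's generate-rotations-until-the-original-repeats loop (character-by-character rebuild via a running modular counter plus a list.count scan of the growing result each iteration) by a closed-form period lookup p = (string+string).find(string, 1) followed by a single slicing comprehension over range(max(p, 1)).
import Mathlib
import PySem

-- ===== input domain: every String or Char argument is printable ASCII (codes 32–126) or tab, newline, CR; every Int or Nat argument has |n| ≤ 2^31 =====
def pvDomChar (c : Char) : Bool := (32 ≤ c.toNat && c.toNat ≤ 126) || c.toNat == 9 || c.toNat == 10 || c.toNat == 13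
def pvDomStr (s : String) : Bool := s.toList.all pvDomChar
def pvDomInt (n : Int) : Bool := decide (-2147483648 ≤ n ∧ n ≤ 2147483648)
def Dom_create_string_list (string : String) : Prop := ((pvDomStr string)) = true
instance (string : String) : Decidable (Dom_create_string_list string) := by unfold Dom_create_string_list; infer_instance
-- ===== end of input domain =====

-- B replaces A's repeated rotate-and-compare loop by a closed-form period lookup
-- ((s+s).find(s, 1)) followed by one slice-building pass (objective: faster,
-- measured; it avoids re-scanning the grown list each round).

-- ===== PORT A =====
-- inner 'while len(ini_string) < len(string)' loop; fuel counts the remaining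
-- iterations (exactly len(string) - len(ini_string)); 'none' of pyGet? is unreachable
def pvInnerA (s : List Char) (length : Int) (ini_string : List Char) (ini_num : Int)
    (fuel : Nat) : List Char × Int :=
  match fuel with
  | 0 => (ini_string, ini_num)
  | fuel + 1 =>
    if ini_string.length < s.length then
      match PySem.List.pyGet? s (PySem.Int.mod ini_num length) with
      | some c => pvInnerA s length (ini_string ++ [c]) (ini_num + 1) fuel
      | none => (ini_string, ini_num)
    else (ini_string, ini_num)

-- outer 'while True' loop; fuel ≥ number of iterations (≤ len(string) + 2) keeps it total
def pvOuterA (s : List Char) (lst : List (List Char)) (ini_num : Int) (fuel : Nat) :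
    List (List Char) :=
  match fuel with
  | 0 => lst
  | fuel + 1 =>
    let r := pvInnerA s (s.length : Int) [] ini_num s.length
    let lst' := lst ++ [r.1]
    if List.count s lst' = 2 then lst'
    else pvOuterA s lst' (r.2 + 1) fuel

def create_string_list (string : String) : List String :=
  let s := string.toList
  ((pvOuterA s [] 0 (s.length + 2)).dropLast).map String.ofList

-- ===== PORT B =====
def create_string_list_alt (string : String) : List String :=
  let s := string.toList
  let p := PySem.Chars.findFrom (s ++ s) s 1 none
  (PySem.List.pyRange 0 (max p 1) 1).map (fun i =>
    String.ofList (PySem.List.slice s (some i) none ++ PySem.List.slice s none (some i)))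

-- ===== PRECONDITION & SPEC =====
def Spec_create_string_list (string : String) (out : List String) : Prop := out = create_string_list_alt string
instance (string : String) (out : List String) : Decidable (Spec_create_string_list string out) := by unfold Spec_create_string_list; infer_instance

-- ===== CLAIM (what is proved, stated in full; the proofs are below) =====
def Claim_equal_create_string_list : Prop := ∀ (string : String), Dom_create_string_list string → Spec_create_string_list string (create_string_list string)

-- ===== LEMMAS AND PROOFS =====

-- rotation of s by k places
def pvRot (s : List Char) (k : Nat) : List Char := s.drop k ++ s.take k

lemma pvRot_exists (s : List Char) (hs : s ≠ []) : ∃ i, 0 < i ∧ pvRot s i = s := by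
  exact ⟨s.length, by simpa using List.length_pos_iff.mpr hs, by simp [pvRot]⟩

-- the rotation period: least i ≥ 1 with rot i = s
def pvPeriod (s : List Char) (hs : s ≠ []) : Nat := Nat.find (pvRot_exists s hs)

lemma pvPeriod_pos (s : List Char) (hs : s ≠ []) : 0 < pvPeriod s hs :=
  (Nat.find_spec (pvRot_exists s hs)).1

lemma pvPeriod_rot (s : List Char) (hs : s ≠ []) : pvRot s (pvPeriod s hs) = s :=
  (Nat.find_spec (pvRot_exists s hs)).2

lemma pvPeriod_le (s : List Char) (hs : s ≠ []) : pvPeriod s hs ≤ s.length :=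
  Nat.find_le ⟨by simpa using List.length_pos_iff.mpr hs, by simp [pvRot]⟩

lemma pvPeriod_min (s : List Char) (hs : s ≠ []) {i : Nat} (h1 : 0 < i)
    (h2 : i < pvPeriod s hs) : pvRot s i ≠ s := by
  intro h
  exact Nat.find_min (pvRot_exists s hs) h2 ⟨h1, h⟩

-- s is a prefix of (s++s).drop i  ↔  rotation by i gives back s  (for i ≤ |s|)
lemma pvPrefix_iff_rot (s : List Char) {i : Nat} (hi : i ≤ s.length) :
    s <+: (s ++ s).drop i ↔ pvRot s i = s := by
  rw [List.drop_append_of_le_length hi, List.prefix_iff_eq_take]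
  have key : List.take s.length (s.drop i ++ s) = s.drop i ++ s.take i := by
    rw [List.take_append, List.take_of_length_le (by simp)]
    have : s.length - (s.drop i).length = i := by simp; omega
    rw [this]
  rw [key, pvRot, eq_comm]

-- B's find call computes exactly the period
lemma pvFind_eq_period (s : List Char) (hs : s ≠ []) :
    PySem.Chars.findFrom (s ++ s) s 1 none = (pvPeriod s hs : Int) := by
  have hn : 0 < s.length := List.length_pos_iff.mpr hs
  have h1 : (1 : Nat) ≤ (s ++ s).length := by simp; omega
  have hinf : s <:+: (s ++ s).drop 1 := by
    obtain ⟨c, t, rfl⟩ := List.exists_cons_of_ne_nil hs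
    have hd : List.drop 1 (c :: t ++ c :: t) = t ++ c :: t := rfl
    rw [hd]
    exact (List.suffix_append t (c :: t)).isInfix
  have hiff := PySem.Chars.findFrom_natCast_eq_neg_one_iff (s ++ s) s 1 h1
  have hspec := PySem.Chars.findFrom_natCast_spec (s ++ s) s 1 h1
  rw [show ((1 : Nat) : Int) = (1 : Int) from rfl] at hiff hspec
  have hne : PySem.Chars.findFrom (s ++ s) s 1 none ≠ -1 := by
    rw [ne_eq, hiff]
    simpa using hinf
  obtain ⟨hle, hpre, hmin⟩ := hspec hne
  set q := (PySem.Chars.findFrom (s ++ s) s 1 none).toNat with hq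
  have h0 : 0 ≤ PySem.Chars.findFrom (s ++ s) s 1 none := le_trans (by norm_num) hle
  have hq1 : 1 ≤ q := by omega
  have hqn : q ≤ s.length := by
    by_contra h
    simp only [not_le] at h
    exact hmin s.length (by omega) (by omega)
      ((pvPrefix_iff_rot s le_rfl).mpr (by simp [pvRot]))
  have hrotq : pvRot s q = s := (pvPrefix_iff_rot s hqn).mp hpre
  have hple : pvPeriod s hs ≤ q := Nat.find_le ⟨hq1, hrotq⟩
  have hqle : q ≤ pvPeriod s hs := by
    by_contra h
    simp only [not_le] at h
    exact hmin (pvPeriod s hs) (pvPeriod_pos s hs) h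
      ((pvPrefix_iff_rot s (pvPeriod_le s hs)).mpr (pvPeriod_rot s hs))
  omega

-- inner loop: builds the chars at positions (m+j) % n, j = 0..fuel-1
lemma pvInnerA_spec (s : List Char) (fuel : Nat) :
    ∀ (acc : List Char) (m : Nat), acc.length + fuel = s.length →
    pvInnerA s (s.length : Int) acc (m : Int) fuel =
      (acc ++ (List.range fuel).map (fun j => s.getD ((m + j) % s.length) 'x'),
       ((m + fuel : Nat) : Int)) := by
  induction fuel with
  | zero =>
    intro acc m hlen
    simp [pvInnerA]
  | succ fuel ih =>
    intro acc m hlen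
    have hn : 0 < s.length := by omega
    have hmn : m % s.length < s.length := Nat.mod_lt _ hn
    rw [pvInnerA, if_pos (by omega)]
    rw [PySem.Int.mod_natCast, PySem.List.pyGet?_natCast, List.getElem?_eq_getElem hmn]
    show pvInnerA s (s.length : Int) (acc ++ [s[m % s.length]]) ((m : Int) + 1) fuel = _
    have harg : ((m : Int) + 1) = (((m + 1 : Nat)) : Int) := by push_cast; ring
    rw [harg, ih (acc ++ [s[m % s.length]]) (m + 1) (by simp; omega)]
    rw [Prod.mk.injEq]
    refine ⟨?_, by congr 1; omega⟩
    · rw [List.append_assoc]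
      congr 1
      rw [List.range_succ_eq_map, List.map_cons, List.map_map, List.singleton_append]
      congr 1
      · simp only [Nat.add_zero]
        exact (List.getD_eq_getElem s 'x' hmn).symm
      · apply List.map_congr_left
        intro j _
        simp only [Function.comp_apply]
        congr 2
        omega

-- the chars at positions (m+j) % n for j = 0..n-1 form the rotation by m % n
lemma pvRange_mod_eq_rot (s : List Char) (hs : s ≠ []) (m : Nat) :
    (List.range s.length).map (fun j => s.getD ((m + j) % s.length) 'x') =
      pvRot s (m % s.length) := by
  have hn : 0 < s.length := List.length_pos_iff.mpr hs
  have hr : m % s.length < s.length := Nat.mod_lt _ hn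
  apply List.ext_getElem
  · simp [pvRot]; omega
  · intro j h1 h2
    simp only [List.length_map, List.length_range] at h1
    rw [List.getElem_map, List.getElem_range, List.getD_eq_getElem s 'x'
      (Nat.mod_lt _ hn)]
    rcases Nat.lt_or_ge j (s.length - m % s.length) with hj | hj
    · have hidx : (m + j) % s.length = m % s.length + j := by
        rw [Nat.add_mod, Nat.mod_eq_of_lt h1, Nat.mod_eq_of_lt (by omega)]
      simp only [pvRot]
      rw [List.getElem_append_left (by simp [List.length_drop]; omega),
        List.getElem_drop]
      simp only [hidx]
    · have hidx : (m + j) % s.length = j - (List.drop (m % s.length) s).length := by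
        rw [Nat.add_mod, Nat.mod_eq_of_lt h1, Nat.mod_eq_sub_mod (by omega),
          Nat.mod_eq_of_lt (by omega), List.length_drop]
        omega
      simp only [pvRot]
      rw [List.getElem_append_right (by simp [List.length_drop]; omega),
        List.getElem_take]
      simp only [hidx]

lemma pvRot_mod (s : List Char) {k : Nat} (hk : k ≤ s.length) :
    pvRot s (k % s.length) = pvRot s k := by
  by_cases h : k < s.length
  · rw [Nat.mod_eq_of_lt h]
  · have hk' : k = s.length := by omega
    subst hk'
    simp [pvRot]

-- how many copies of s sit in [rot 0, …, rot k]
lemma pvCount_rot (s : List Char) (hs : s ≠ []) {k : Nat} (hk : k ≤ pvPeriod s hs) :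
    List.count s ((List.range (k + 1)).map (pvRot s)) =
      if k = pvPeriod s hs then 2 else 1 := by
  induction k with
  | zero =>
    have h0 : pvRot s 0 = s := by simp [pvRot]
    rw [if_neg (pvPeriod_pos s hs).ne]
    simp [h0]
  | succ k ih =>
    rw [List.range_succ, List.map_append, List.count_append]
    rw [ih (by omega), if_neg (by omega)]
    by_cases he : k + 1 = pvPeriod s hs
    · rw [if_pos he, he]
      simp [pvPeriod_rot]
    · rw [if_neg he]
      have : pvRot s (k + 1) ≠ s := pvPeriod_min s hs (by omega) (by omega)
      simp [List.count_singleton]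
      simpa [eq_comm] using this

-- outer loop invariant
lemma pvOuterA_spec (s : List Char) (hs : s ≠ []) (fuel : Nat) :
    ∀ (k : Nat), k ≤ pvPeriod s hs → pvPeriod s hs + 1 ≤ k + fuel →
    pvOuterA s ((List.range k).map (pvRot s)) ((k * (s.length + 1) : Nat) : Int) fuel =
      (List.range (pvPeriod s hs + 1)).map (pvRot s) := by
  induction fuel with
  | zero => intro k hk hfe; omega
  | succ fuel ih =>
    intro k hk hfe
    have hn : 0 < s.length := List.length_pos_iff.mpr hs
    have hkn : k ≤ s.length := le_trans hk (pvPeriod_le s hs)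
    rw [pvOuterA]
    rw [pvInnerA_spec s s.length [] (k * (s.length + 1)) (by simp)]
    simp only [List.nil_append]
    rw [pvRange_mod_eq_rot s hs]
    have hmod : (k * (s.length + 1)) % s.length = k % s.length := by
      have h1 : k * (s.length + 1) = k + k * s.length := by ring
      rw [h1, Nat.add_mul_mod_self_right]
    rw [hmod, pvRot_mod s hkn]
    have hlst : (List.range k).map (pvRot s) ++ [pvRot s k] =
        (List.range (k + 1)).map (pvRot s) := by
      rw [List.range_succ, List.map_append, List.map_singleton]
    rw [hlst, pvCount_rot s hs hk]
    by_cases he : k = pvPeriod s hs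
    · rw [if_pos (by rw [if_pos he])]
      rw [he]
    · rw [if_neg (by rw [if_neg he]; omega)]
      have harg : (((k * (s.length + 1) + s.length : Nat)) : Int) + 1 =
          (((k + 1) * (s.length + 1) : Nat) : Int) := by push_cast; ring
      rw [harg]
      exact ih (k + 1) (by omega) (by omega)

-- ===== VERDICT (by name: the statement is the Claim_ definition above) =====
theorem create_string_list_spec : Claim_equal_create_string_list := by
  intro string _
  unfold Spec_create_string_list
  by_cases hs : string.toList = []
  · simp only [create_string_list, create_string_list_alt, hs]
    decide
  · have hn : 0 < string.toList.length := List.length_pos_iff.mpr hs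
    set s := string.toList with hsdef
    have hA : create_string_list string =
        ((List.range (pvPeriod s hs)).map (pvRot s)).map String.ofList := by
      have h0 := pvOuterA_spec s hs (s.length + 2) 0 (by omega)
        (by have := pvPeriod_le s hs; omega)
      simp only [List.range_zero, List.map_nil, Nat.zero_mul, Nat.cast_zero] at h0
      simp only [create_string_list, ← hsdef, h0]
      rw [List.range_succ, List.map_append, List.map_singleton,
        List.dropLast_concat]
    have hB : create_string_list_alt string =
        ((List.range (pvPeriod s hs)).map (pvRot s)).map String.ofList := by
      simp only [create_string_list_alt, ← hsdef]
      rw [pvFind_eq_period s hs]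
      have hmax : max ((pvPeriod s hs : Nat) : Int) 1 = ((pvPeriod s hs : Nat) : Int) := by
        have := pvPeriod_pos s hs
        omega
      rw [hmax, PySem.List.pyRange_one]
      simp only [sub_zero, Int.toNat_natCast, List.map_map]
      apply List.map_congr_left
      intro k _
      simp only [Function.comp, zero_add, PySem.List.slice_from_natCast,
        PySem.List.slice_to_natCast, pvRot]
    rw [hA, hB]
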